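-- pv_equiv track=rewrite | github.com/g-bulgarit/TAU_EE_Python_Semester1 | HW4/ex4_315781666.py | find_substring_locations
-- ===== SOURCE A (Python) =====
-- def find_substring_locations(s, k):
--     # for every two characters, make a dictionary entry
--     output_dict = {}
--     for char_loc in range(0, len(s)-k+1):
--         chars = s[char_loc:char_loc+k]
--
--         if chars not in output_dict:
--             output_dict[chars] = []
--
--         for position in range(len(s)-k+1):
--             pair = s[position:position+k]
--             if pair == chars:
--                 if position not in output_dict[chars]:
--                     output_dict[chars].append(position)
--
--     return output_dict
-- ===== SOURCE B (Python) =====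
-- def find_substring_locations(s, k):
--     # Single pass: append each start position to its substring's bucket.
--     output_dict = {}
--     for i in range(len(s) - k + 1):
--         output_dict.setdefault(s[i:i+k], []).append(i)
--     return output_dict
-- ===== Notes on version B (the rewrite author's own statement) =====
-- stated objective: faster
-- what changed: A rescans every window of the whole string (and does a membership test on the bucket) for each outer position; B makes a single pass appending each position to its substring's bucket via setdefault.
import Mathlib
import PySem

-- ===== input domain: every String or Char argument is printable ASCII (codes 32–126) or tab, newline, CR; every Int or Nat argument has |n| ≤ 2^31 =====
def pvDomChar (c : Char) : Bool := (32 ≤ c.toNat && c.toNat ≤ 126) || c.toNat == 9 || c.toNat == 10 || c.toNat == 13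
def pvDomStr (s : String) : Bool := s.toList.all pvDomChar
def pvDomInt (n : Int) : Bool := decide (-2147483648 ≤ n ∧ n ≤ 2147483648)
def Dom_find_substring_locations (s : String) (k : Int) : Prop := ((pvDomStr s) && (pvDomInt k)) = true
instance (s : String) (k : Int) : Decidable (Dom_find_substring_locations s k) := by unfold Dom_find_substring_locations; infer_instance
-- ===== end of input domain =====

-- B replaces A's quadratic rescan of the whole string for every position by a single pass that
-- appends each position to its substring's bucket (objective: faster); same returned dict proved.

-- ===== PORT A =====
-- inner loop 'for position in range(len(s)-k+1): …' of A
def find_substring_locations_inner (s : String) (k : Int) (chars : String)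
    (d : PySem.Dict String (List Int)) (position : Int) : PySem.Dict String (List Int) :=
  let pair := PySem.Str.slice s (some position) (some (position + k))
  if pair == chars then
    if (d.getD chars []).contains position then d
    else d.insert chars (d.getD chars [] ++ [position])   -- output_dict[chars].append(position)
  else d

-- body of A's outer loop 'for char_loc in range(0, len(s)-k+1): …'
def find_substring_locations_outer (s : String) (k : Int)
    (d : PySem.Dict String (List Int)) (char_loc : Int) : PySem.Dict String (List Int) :=
  let chars := PySem.Str.slice s (some char_loc) (some (char_loc + k))
  let d1 := if d.contains chars then d else d.insert chars []
  (PySem.List.pyRange 0 (PySem.Str.len s - k + 1) 1).foldl (find_substring_locations_inner s k chars) d1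

def find_substring_locations (s : String) (k : Int) : List (String × List Int) :=
  ((PySem.List.pyRange 0 (PySem.Str.len s - k + 1) 1).foldl
      (find_substring_locations_outer s k) PySem.Dict.empty).items

-- ===== PORT B =====
-- single pass: output_dict.setdefault(s[i:i+k], []).append(i)
def find_substring_locations_alt (s : String) (k : Int) : List (String × List Int) :=
  ((PySem.List.pyRange 0 (PySem.Str.len s - k + 1) 1).foldl
      (fun d i => d.modify (PySem.Str.slice s (some i) (some (i + k))) [] (fun l => l ++ [i]))
      PySem.Dict.empty).items

-- ===== PRECONDITION & SPEC =====
def Spec_find_substring_locations (s : String) (k : Int) (out : List (String × List Int)) : Prop := out = find_substring_locations_alt s k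
instance (s : String) (k : Int) (out : List (String × List Int)) : Decidable (Spec_find_substring_locations s k out) := by unfold Spec_find_substring_locations; infer_instance

-- ===== CLAIM (what is proved, stated in full; the proofs are below) =====
def Claim_equal_find_substring_locations : Prop := ∀ (s : String) (k : Int), Dom_find_substring_locations s k → Spec_find_substring_locations s k (find_substring_locations s k)

-- ===== LEMMAS AND PROOFS =====

-- the substring starting at i, and the canonical grouped dictionary both programs converge to
def pvSub (s : String) (k : Int) (i : Int) : String := PySem.Str.slice s (some i) (some (i + k))

-- the dict after A has processed outer positions q: keys = substrings of q in first-occurrence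
-- order, each already mapped to its FULL list of occurrences in ps
def pvGroup (sub : Int → String) (ps q : List Int) : PySem.Dict String (List Int) :=
  PySem.Dict.mk ((PySem.Set.ofList (q.map sub)).map (fun c => (c, ps.filter (fun p => sub p == c))))

-- A's inner/outer steps, abstracted over the substring function
def pvInner (sub : Int → String) (chars : String)
    (d : PySem.Dict String (List Int)) (p : Int) : PySem.Dict String (List Int) :=
  if sub p == chars then
    if (d.getD chars []).contains p then d
    else d.insert chars (d.getD chars [] ++ [p])
  else d

def pvOuter (sub : Int → String) (ps : List Int)
    (d : PySem.Dict String (List Int)) (i : Int) : PySem.Dict String (List Int) :=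
  ps.foldl (pvInner sub (sub i)) (if d.contains (sub i) then d else d.insert (sub i) [])

theorem pvOuter_eq (s : String) (k : Int) :
    find_substring_locations_outer s k
      = pvOuter (pvSub s k) (PySem.List.pyRange 0 (PySem.Str.len s - k + 1) 1) := rfl

theorem pv_foldl_fix {α β : Type} (f : β → α → β) (d : β) (l : List α)
    (h : ∀ x ∈ l, f d x = d) : l.foldl f d = d := by
  induction l with
  | nil => rfl
  | cons x xs ih =>
    rw [List.foldl_cons, h x (by simp)]
    exact ih (fun y hy => h y (List.mem_cons_of_mem _ hy))

theorem pvGroup_keys (sub : Int → String) (ps q : List Int) :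
    (pvGroup sub ps q).keys = PySem.Set.ofList (q.map sub) := by
  simp [pvGroup, PySem.Dict.keys_mk, Function.comp_def]

theorem pvGroup_nodup_keys (sub : Int → String) (ps q : List Int) :
    (pvGroup sub ps q).keys.Nodup := by
  rw [pvGroup_keys]; exact PySem.Set.nodup_ofList _

theorem pvGroup_getD (sub : Int → String) (ps q : List Int) (c : String)
    (hc : c ∈ PySem.Set.ofList (q.map sub)) :
    (pvGroup sub ps q).getD c [] = ps.filter (fun p => sub p == c) :=
  PySem.Dict.getD_of_mem_items _
    (List.mem_map_of_mem (f := fun c => (c, ps.filter (fun p => sub p == c))) hc)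
    (pvGroup_nodup_keys sub ps q) []

theorem pvInner_fix (sub : Int → String) (ps q : List Int) (chars : String)
    (hchars : chars ∈ PySem.Set.ofList (q.map sub)) :
    ∀ p ∈ ps, pvInner sub chars (pvGroup sub ps q) p = pvGroup sub ps q := by
  intro p hp
  unfold pvInner
  by_cases h : (sub p == chars) = true
  · rw [if_pos h, pvGroup_getD sub ps q chars hchars,
      if_pos (List.contains_iff_mem.mpr (List.mem_filter.mpr ⟨hp, h⟩))]
  · rw [if_neg h]

theorem pv_getD_snoc (L : List (String × List Int)) (chars : String) (v : List Int)
    (hL : ∀ e ∈ L, e.1 ≠ chars) (hnd : (L.map Prod.fst).Nodup) :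
    (PySem.Dict.mk (L ++ [(chars, v)])).getD chars [] = v := by
  apply PySem.Dict.getD_of_mem_items _ (List.mem_append_right _ (by simp))
  have hk : (PySem.Dict.mk (L ++ [(chars, v)])).keys = L.map Prod.fst ++ [chars] := by
    rw [PySem.Dict.keys_mk]; simp
  rw [hk, List.nodup_append]
  refine ⟨hnd, List.nodup_singleton _, ?_⟩
  intro a ha b hb
  obtain ⟨e, he, rfl⟩ := List.mem_map.mp ha
  have : b = chars := by simpa using hb
  exact this ▸ hL e he

theorem pv_contains_snoc (L : List (String × List Int)) (chars : String) (v : List Int) :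
    (PySem.Dict.mk (L ++ [(chars, v)])).contains chars = true := by
  simp [PySem.Dict.contains]

theorem pv_insert_snoc (L : List (String × List Int)) (chars : String) (v w : List Int)
    (hL : ∀ e ∈ L, e.1 ≠ chars) :
    (PySem.Dict.mk (L ++ [(chars, v)])).insert chars w = PySem.Dict.mk (L ++ [(chars, w)]) := by
  apply PySem.Dict.ext
  rw [PySem.Dict.items_insert_of_contains _ _ (pv_contains_snoc L chars v)]
  show (L ++ [(chars, v)]).map _ = _
  rw [List.map_append]
  have h1 : L.map (fun p => if (p.1 == chars) = true then (chars, w) else p) = L := by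
    conv_rhs => rw [← List.map_id L]
    exact List.map_congr_left (fun e he => by simp [hL e he])
  rw [h1]; simp

theorem pv_inner_fold (sub : Int → String) (ps : List Int) (hnd : ps.Nodup) (chars : String)
    (L : List (String × List Int)) (hL : ∀ e ∈ L, e.1 ≠ chars) (hLnd : (L.map Prod.fst).Nodup) :
    ∀ (r q : List Int), ps = q ++ r →
      r.foldl (pvInner sub chars)
          (PySem.Dict.mk (L ++ [(chars, q.filter (fun p => sub p == chars))])) =
        PySem.Dict.mk (L ++ [(chars, ps.filter (fun p => sub p == chars))]) := by
  intro r
  induction r with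
  | nil => intro q h; rw [List.append_nil] at h; rw [h]; rfl
  | cons p r ih =>
    intro q h
    have hpq : p ∉ q := by
      have hnd2 : (q ++ p :: r).Nodup := h ▸ hnd
      obtain ⟨-, -, hdisj⟩ := List.nodup_append.mp hnd2
      exact fun hx => hdisj p hx p (List.mem_cons_self ..) rfl
    rw [List.foldl_cons]
    by_cases hmatch : (sub p == chars) = true
    · have hstep : pvInner sub chars
          (PySem.Dict.mk (L ++ [(chars, q.filter (fun p => sub p == chars))])) p =
          PySem.Dict.mk (L ++ [(chars, (q ++ [p]).filter (fun p => sub p == chars))]) := by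
        unfold pvInner
        rw [if_pos hmatch, pv_getD_snoc L chars _ hL hLnd,
          if_neg (by
            intro hx
            exact hpq (List.mem_filter.mp (List.contains_iff_mem.mp hx)).1),
          pv_insert_snoc L chars _ _ hL]
        simp [List.filter_append, hmatch]
      rw [hstep]
      exact ih (q ++ [p]) (by rw [h]; simp)
    · have hstep : pvInner sub chars
          (PySem.Dict.mk (L ++ [(chars, q.filter (fun p => sub p == chars))])) p =
          PySem.Dict.mk (L ++ [(chars, q.filter (fun p => sub p == chars))]) := by
        unfold pvInner; rw [if_neg hmatch]
      rw [hstep]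
      have hfilt : q.filter (fun p => sub p == chars)
          = (q ++ [p]).filter (fun p => sub p == chars) := by
        simp [List.filter_append, hmatch]
      rw [hfilt]
      exact ih (q ++ [p]) (by rw [h]; simp)

theorem pv_snoc_set (sub : Int → String) (q : List Int) (i : Int) :
    PySem.Set.ofList ((q ++ [i]).map sub)
      = PySem.Set.add (PySem.Set.ofList (q.map sub)) (sub i) := by
  rw [List.map_append, PySem.Set.ofList_eq_foldl, List.foldl_append,
    ← PySem.Set.ofList_eq_foldl]
  rfl

theorem pv_outer_step (sub : Int → String) (ps : List Int) (hnd : ps.Nodup)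
    (q : List Int) (i : Int) :
    pvOuter sub ps (pvGroup sub ps q) i = pvGroup sub ps (q ++ [i]) := by
  by_cases hc : sub i ∈ PySem.Set.ofList (q.map sub)
  · have hcont : (pvGroup sub ps q).contains (sub i) = true :=
      (PySem.Dict.contains_iff_mem_keys _ _).mpr (by rw [pvGroup_keys]; exact hc)
    unfold pvOuter
    rw [if_pos hcont,
      pv_foldl_fix _ _ _ (pvInner_fix sub ps q (sub i) hc)]
    unfold pvGroup
    rw [pv_snoc_set sub q i]
    have hadd : PySem.Set.add (PySem.Set.ofList (q.map sub)) (sub i)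
        = PySem.Set.ofList (q.map sub) := by
      simp [PySem.Set.add, PySem.Set.contains, hc]
    rw [hadd]
  · have hcont : (pvGroup sub ps q).contains (sub i) = false := by
      apply Bool.eq_false_iff.mpr
      intro hx
      exact hc (by rw [← pvGroup_keys sub ps q]; exact (PySem.Dict.contains_iff_mem_keys _ _).mp hx)
    unfold pvOuter
    rw [if_neg (by simp [hcont])]
    have hins : (pvGroup sub ps q).insert (sub i) [] =
        PySem.Dict.mk (((PySem.Set.ofList (q.map sub)).map
          (fun c => (c, ps.filter (fun p => sub p == c)))) ++ [(sub i, [])]) := by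
      apply PySem.Dict.ext
      rw [PySem.Dict.items_insert_of_not_contains _ _ hcont]
      rfl
    have hL : ∀ e ∈ (PySem.Set.ofList (q.map sub)).map
        (fun c => (c, ps.filter (fun p => sub p == c))), e.1 ≠ sub i := by
      intro e he
      obtain ⟨c, hcm, rfl⟩ := List.mem_map.mp he
      exact fun hx => hc (hx ▸ hcm)
    have hLnd : (((PySem.Set.ofList (q.map sub)).map
        (fun c => (c, ps.filter (fun p => sub p == c)))).map Prod.fst).Nodup := by
      rw [List.map_map]
      simp [Function.comp_def, PySem.Set.nodup_ofList]
    have := pv_inner_fold sub ps hnd (sub i) _ hL hLnd ps [] rfl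
    simp only [List.filter_nil] at this
    rw [hins, this]
    unfold pvGroup
    rw [pv_snoc_set sub q i]
    have hadd : PySem.Set.add (PySem.Set.ofList (q.map sub)) (sub i)
        = PySem.Set.ofList (q.map sub) ++ [sub i] := by
      simp [PySem.Set.add, PySem.Set.contains, hc]
    rw [hadd, List.map_append]
    rfl

theorem pv_outer_fold (sub : Int → String) (ps : List Int) (hnd : ps.Nodup) :
    ∀ (r q : List Int), ps = q ++ r →
      r.foldl (pvOuter sub ps) (pvGroup sub ps q) = pvGroup sub ps ps := by
  intro r
  induction r with
  | nil => intro q h; rw [List.append_nil] at h; rw [h]; rfl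
  | cons i r ih =>
    intro q h
    rw [List.foldl_cons, pv_outer_step sub ps hnd q i]
    exact ih (q ++ [i]) (by rw [h]; simp)

theorem pv_A_eq (s : String) (k : Int) :
    find_substring_locations s k =
      (pvGroup (pvSub s k) (PySem.List.pyRange 0 (PySem.Str.len s - k + 1) 1)
        (PySem.List.pyRange 0 (PySem.Str.len s - k + 1) 1)).items := by
  unfold find_substring_locations
  rw [pvOuter_eq s k]
  have h0 : (PySem.Dict.empty : PySem.Dict String (List Int)) =
      pvGroup (pvSub s k) (PySem.List.pyRange 0 (PySem.Str.len s - k + 1) 1) [] := rfl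
  rw [h0, pv_outer_fold (pvSub s k) _ (PySem.List.nodup_pyRange_one _ _) _ []
    (List.nil_append _).symm]

theorem pv_B_getD (s : String) (k : Int) (c : String) :
    ((PySem.List.pyRange 0 (PySem.Str.len s - k + 1) 1).foldl
      (fun d i => d.modify (PySem.Str.slice s (some i) (some (i + k))) [] (fun l => l ++ [i]))
      PySem.Dict.empty).getD c []
    = (PySem.List.pyRange 0 (PySem.Str.len s - k + 1) 1).filter (fun p => pvSub s k p == c) := by
  have h : (PySem.List.pyRange 0 (PySem.Str.len s - k + 1) 1).foldl
      (fun d i => d.modify (PySem.Str.slice s (some i) (some (i + k))) [] (fun l => l ++ [i]))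
      PySem.Dict.empty
    = ((PySem.List.pyRange 0 (PySem.Str.len s - k + 1) 1).map
        (fun i => (pvSub s k i, i))).foldl
      (fun d p => d.modify p.1 [] (fun l => l ++ [p.2])) PySem.Dict.empty := by
    rw [List.foldl_map]; rfl
  rw [h, PySem.Dict.getD_foldl_modify_append]
  simp [List.filter_map, Function.comp_def, List.map_map]

theorem pv_B_eq (s : String) (k : Int) :
    find_substring_locations_alt s k =
      (pvGroup (pvSub s k) (PySem.List.pyRange 0 (PySem.Str.len s - k + 1) 1)
        (PySem.List.pyRange 0 (PySem.Str.len s - k + 1) 1)).items := by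
  unfold find_substring_locations_alt
  have hkeys : ((PySem.List.pyRange 0 (PySem.Str.len s - k + 1) 1).foldl
      (fun d i => d.modify (PySem.Str.slice s (some i) (some (i + k))) [] (fun l => l ++ [i]))
      PySem.Dict.empty).keys
    = PySem.Set.ofList ((PySem.List.pyRange 0 (PySem.Str.len s - k + 1) 1).map (pvSub s k)) := by
    rw [PySem.Dict.keys_foldl_modify_key _ (fun i => PySem.Str.slice s (some i) (some (i + k)))
      [] (fun _ i => fun l => l ++ [i]), PySem.Dict.keys_empty, PySem.Set.update_nil_left]
    rfl
  have hnd : ((PySem.List.pyRange 0 (PySem.Str.len s - k + 1) 1).foldl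
      (fun d i => d.modify (PySem.Str.slice s (some i) (some (i + k))) [] (fun l => l ++ [i]))
      PySem.Dict.empty).keys.Nodup := by
    rw [hkeys]; exact PySem.Set.nodup_ofList _
  rw [PySem.Dict.items_eq_map_keys _ hnd [], hkeys]
  unfold pvGroup
  show _ = List.map _ _
  apply List.map_congr_left
  intro c _
  rw [pv_B_getD s k c]

-- ===== VERDICT (by name: the statement is the Claim_ definition above) =====
theorem find_substring_locations_spec : Claim_equal_find_substring_locations := by
  intro s k _
  unfold Spec_find_substring_locations
  rw [pv_A_eq, pv_B_eq]
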